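-- pv_equiv track=rewrite | github.com/cobaltt7/python-exercises | 3 puzzles/72-73.py | seventyThree
-- ===== SOURCE A (Python) =====
-- def seventyThree(data):
--     """
--     Write a Python program to find a substring in a given string that contains a vowel between two
--     consonants.
--     """
--     string = ""
--     for letter in data:
--         if letter in "aeiouAEIOU":
--             if len(string) == 1:
--                 string += letter
--             else:
--                 string = ""
--         else:
--             if len(string) < 2:
--                 string = letter
--             else:
--                 return string + letter
-- ===== SOURCE B (Python) =====
-- def seventyThree(data):
--     """
--     Write a Python program to find a substring in a given string that contains a vowel between two
--     consonants.
--     """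
--     vowels = "aeiouAEIOU"
--     for a, b, c in zip(data, data[1:], data[2:]):
--         if b in vowels and a not in vowels and c not in vowels:
--             return a + b + c
--     return None
-- ===== Notes on version B (the rewrite author's own statement) =====
-- stated objective: idiomatic
-- what changed: Replaces A's incremental buffer state machine with a single sliding-window pass over zip(data, data[1:], data[2:]) that returns the first consonant-vowel-consonant triple.
import Mathlib
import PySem

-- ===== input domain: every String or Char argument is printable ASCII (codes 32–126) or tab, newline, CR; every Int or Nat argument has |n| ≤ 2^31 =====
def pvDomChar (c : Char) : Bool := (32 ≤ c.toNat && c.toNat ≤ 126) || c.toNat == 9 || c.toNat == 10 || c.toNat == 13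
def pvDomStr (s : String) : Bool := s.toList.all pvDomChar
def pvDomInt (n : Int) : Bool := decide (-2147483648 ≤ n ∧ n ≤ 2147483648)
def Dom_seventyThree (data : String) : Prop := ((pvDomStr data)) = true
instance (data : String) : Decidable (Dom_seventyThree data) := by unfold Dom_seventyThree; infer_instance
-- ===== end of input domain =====

-- B replaces A's buffer state machine by an idiomatic sliding-window scan; return value only, same cost.

-- ===== PORT A =====
-- 'letter in "aeiouAEIOU"'
def pvVowel (ch : Char) : Bool := "aeiouAEIOU".toList.contains ch

-- the loop of A: state 'string' is the buffer, early 'return' = some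
def seventyThreeGo : List Char → List Char → Option String
  | [], _ => none
  | letter :: rest, string =>
    if pvVowel letter then
      if string.length = 1 then seventyThreeGo rest (string ++ [letter])
      else seventyThreeGo rest []
    else
      if string.length < 2 then seventyThreeGo rest [letter]
      else some (String.ofList (string ++ [letter]))

def seventyThree (data : String) : Option String :=
  seventyThreeGo data.toList []

-- ===== PORT B =====
def seventyThree_alt (data : String) : Option String :=
  let l := data.toList
  ((l.zip ((l.drop 1).zip (l.drop 2))).find?
      (fun t => pvVowel t.2.1 && !pvVowel t.1 && !pvVowel t.2.2)).map
    (fun t => String.ofList [t.1, t.2.1, t.2.2])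

-- ===== PRECONDITION & SPEC =====
def Spec_seventyThree (data : String) (out : Option String) : Prop := out = seventyThree_alt data
instance (data : String) (out : Option String) : Decidable (Spec_seventyThree data out) := by unfold Spec_seventyThree; infer_instance

-- ===== CLAIM (what is proved, stated in full; the proofs are below) =====
def Claim_equal_seventyThree : Prop := ∀ (data : String), Dom_seventyThree data → Spec_seventyThree data (seventyThree data)

-- ===== LEMMAS AND PROOFS =====

-- recursive form of B's window scan (proof helper)
def pvScanR : List Char → Option String
  | a :: b :: c :: r =>
    if pvVowel b && !pvVowel a && !pvVowel c then some (String.ofList [a, b, c])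
    else pvScanR (b :: c :: r)
  | _ => none

lemma scan_eq (l : List Char) :
    ((l.zip ((l.drop 1).zip (l.drop 2))).find?
        (fun t => pvVowel t.2.1 && !pvVowel t.1 && !pvVowel t.2.2)).map
      (fun t => String.ofList [t.1, t.2.1, t.2.2]) = pvScanR l := by
  induction l using pvScanR.induct with
  | case1 a b c r hcond =>
    simp [pvScanR, hcond]
  | case2 a b c r hcond ih =>
    have hc : (pvVowel b && !pvVowel a && !pvVowel c) = false := by
      simpa using hcond
    simp only [List.drop, List.zip_cons_cons, List.find?_cons, hc]
    rw [pvScanR, if_neg (by simp [hc])]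
    simpa using ih
  | case3 l h =>
    cases l with
    | nil => rfl
    | cons a t => cases t with
      | nil => rfl
      | cons b u => cases u with
        | nil => rfl
        | cons c r => exact absurd rfl (h a b c r)

lemma key (l : List Char) :
    (seventyThreeGo l [] = pvScanR l)
    ∧ (∀ c, pvVowel c = false → seventyThreeGo l [c] = pvScanR (c :: l))
    ∧ (∀ c v, pvVowel c = false → pvVowel v = true →
        seventyThreeGo l [c, v] = pvScanR (c :: v :: l)) := by
  induction l with
  | nil => refine ⟨rfl, fun c _ => rfl, fun c v _ _ => rfl⟩
  | cons a t ih =>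
    obtain ⟨ih0, ih1, ih2⟩ := ih
    refine ⟨?_, ?_, ?_⟩
    · by_cases ha : pvVowel a = true
      · rw [show seventyThreeGo (a :: t) [] = seventyThreeGo t [] by
          simp [seventyThreeGo, ha], ih0]
        cases t with
        | nil => rfl
        | cons b u => cases u with
          | nil => rfl
          | cons c r => simp [pvScanR, ha]
      · rw [show seventyThreeGo (a :: t) [] = seventyThreeGo t [a] by
          simp [seventyThreeGo, ha]]
        exact ih1 a (by simpa using ha)
    · intro c hc
      by_cases ha : pvVowel a = true
      · rw [show seventyThreeGo (a :: t) [c] = seventyThreeGo t [c, a] by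
          simp [seventyThreeGo, ha]]
        exact ih2 c a hc ha
      · rw [show seventyThreeGo (a :: t) [c] = seventyThreeGo t [a] by
          simp [seventyThreeGo, ha], ih1 a (by simpa using ha)]
        cases t with
        | nil => rfl
        | cons b u => simp [pvScanR, ha]
    · intro c v hc hv
      by_cases ha : pvVowel a = true
      · rw [show seventyThreeGo (a :: t) [c, v] = seventyThreeGo t [] by
          simp [seventyThreeGo, ha], ih0]
        have h1 : pvScanR (c :: v :: a :: t) = pvScanR (v :: a :: t) := by
          simp [pvScanR, ha]
        rw [h1]
        cases t with
        | nil => simp [pvScanR]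
        | cons b u =>
          have h2 : pvScanR (v :: a :: b :: u) = pvScanR (a :: b :: u) := by
            simp [pvScanR, hv]
          rw [h2]
          cases u with
          | nil => rfl
          | cons c2 r => simp [pvScanR, ha]
      · simp [seventyThreeGo, ha, pvScanR, hc, hv]

-- ===== VERDICT (by name: the statement is the Claim_ definition above) =====
theorem seventyThree_spec : Claim_equal_seventyThree := by
  intro data _
  show seventyThree data = seventyThree_alt data
  rw [seventyThree, seventyThree_alt, (key data.toList).1, scan_eq]
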